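-- pv_equiv track=rewrite | github.com/ljunker/aoc | 2015-py/day16/main.py | matches_part2
-- ===== SOURCE A (Python) =====
-- def matches_part2(sue_props, mfcsam):
--     """
--     Part 2 rules:
--       - cats, trees: Sue's value > MFCSAM value
--       - pomeranians, goldfish: Sue's value < MFCSAM value
--       - everything else: equality
--     """
--     for k, v in sue_props.items():
--         if k not in mfcsam:
--             continue
--
--         ref = mfcsam[k]
--         if k in ("cats", "trees"):
--             if not (v > ref):
--                 return False
--         elif k in ("pomeranians", "goldfish"):
--             if not (v < ref):
--                 return False
--         else:
--             if v != ref: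
--                 return False
--
--     return True
-- ===== SOURCE B (Python) =====
-- def matches_part2(sue_props, mfcsam):
--     # Stage 1: join Sue's readings with the MFCSAM reference values.
--     shared = [(k, v, mfcsam[k]) for k, v in sue_props.items() if k in mfcsam]
--     # Stage 2: partition by rule category.
--     gt_diffs = [v - r for k, v, r in shared if k in ("cats", "trees")]
--     lt_diffs = [v - r for k, v, r in shared if k in ("pomeranians", "goldfish")]
--     eq_pairs = [(v, r) for k, v, r in shared
--                 if k not in ("cats", "trees", "pomeranians", "goldfish")]
--     # Stage 3: aggregate checks — strict rules hold iff the extremal difference does.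
--     return (min(gt_diffs, default=1) > 0
--             and max(lt_diffs, default=-1) < 0
--             and all(v == r for v, r in eq_pairs))
-- ===== Notes on version B (the rewrite author's own statement) =====
-- stated objective: alternative
-- what changed: Replaces A's single pass with per-key branch dispatch and early returns by a staged join/partition/aggregate pipeline: join Sue's properties with the reference, split into the three rule categories, then decide the strict categories by extremal value-difference aggregates (min of differences > 0, max < 0) and the rest by an equality check.
import Mathlib
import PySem

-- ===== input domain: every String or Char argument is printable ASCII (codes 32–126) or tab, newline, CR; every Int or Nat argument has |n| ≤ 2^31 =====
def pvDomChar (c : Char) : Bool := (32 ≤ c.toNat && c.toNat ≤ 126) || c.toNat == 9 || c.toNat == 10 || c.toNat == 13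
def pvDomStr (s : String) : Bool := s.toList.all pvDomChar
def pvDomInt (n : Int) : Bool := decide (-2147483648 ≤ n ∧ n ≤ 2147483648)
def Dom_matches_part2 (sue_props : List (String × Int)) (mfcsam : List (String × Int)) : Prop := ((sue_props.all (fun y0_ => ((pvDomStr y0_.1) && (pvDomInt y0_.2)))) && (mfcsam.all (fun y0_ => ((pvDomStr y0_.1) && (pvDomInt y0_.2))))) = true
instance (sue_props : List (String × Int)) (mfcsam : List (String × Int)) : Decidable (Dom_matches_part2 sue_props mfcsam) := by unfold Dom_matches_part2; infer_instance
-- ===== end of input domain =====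

-- ===== PORT A =====
-- B replaces A's single dispatching pass by a staged join/partition pipeline with
-- min/max difference aggregates for the strict categories (alternative decomposition, same cost).
-- the for-loop of A: early 'return False' = result false, 'continue' = recurse
def matchesP2Loop (mfcsam : List (String × Int)) : List (String × Int) → Bool
  | [] => true
  | (k, v) :: rest =>
    match (mfcsam.find? (fun p => p.1 == k)).map (·.2) with   -- 'k not in mfcsam' / 'mfcsam[k]' (first match)
    | none => matchesP2Loop mfcsam rest
    | some ref =>
      if k == "cats" || k == "trees" then
        if !(decide (v > ref)) then false else matchesP2Loop mfcsam rest
      else if k == "pomeranians" || k == "goldfish" then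
        if !(decide (v < ref)) then false else matchesP2Loop mfcsam rest
      else
        if v != ref then false else matchesP2Loop mfcsam rest

def matches_part2 (sue_props : List (String × Int)) (mfcsam : List (String × Int)) : Bool :=
  matchesP2Loop mfcsam sue_props

-- ===== PORT B =====
-- 'k in ("cats", "trees")' / 'k in ("pomeranians", "goldfish")'
def p2IsGT (k : String) : Bool := k == "cats" || k == "trees"
def p2IsLT (k : String) : Bool := k == "pomeranians" || k == "goldfish"

-- Python's min(xs, default=d) / max(xs, default=d)
def p2MinD (xs : List Int) (d : Int) : Int :=
  match xs with
  | [] => d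
  | x :: rest => rest.foldl min x

def p2MaxD (xs : List Int) (d : Int) : Int :=
  match xs with
  | [] => d
  | x :: rest => rest.foldl max x

-- the join comprehension: [(k, v, mfcsam[k]) for k, v in sue_props.items() if k in mfcsam]
def p2Shared (sue_props : List (String × Int)) (mfcsam : List (String × Int)) :
    List (String × Int × Int) :=
  sue_props.filterMap (fun kv =>
    (mfcsam.find? (fun p => p.1 == kv.1)).map (fun p => (kv.1, kv.2, p.2)))

def matches_part2_alt (sue_props : List (String × Int)) (mfcsam : List (String × Int)) : Bool :=
  let shared := p2Shared sue_props mfcsam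
  let gtDiffs := (shared.filter (fun t => p2IsGT t.1)).map (fun t => t.2.1 - t.2.2)
  let ltDiffs := (shared.filter (fun t => p2IsLT t.1)).map (fun t => t.2.1 - t.2.2)
  let eqPairs := (shared.filter (fun t => !(p2IsGT t.1 || p2IsLT t.1))).map (fun t => t.2)
  decide (p2MinD gtDiffs 1 > 0) && decide (p2MaxD ltDiffs (-1) < 0) &&
    eqPairs.all (fun vr => vr.1 == vr.2)

-- ===== PRECONDITION & SPEC =====
def Spec_matches_part2 (sue_props : List (String × Int)) (mfcsam : List (String × Int)) (out : Bool) : Prop := out = matches_part2_alt sue_props mfcsam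
instance (sue_props : List (String × Int)) (mfcsam : List (String × Int)) (out : Bool) : Decidable (Spec_matches_part2 sue_props mfcsam out) := by unfold Spec_matches_part2; infer_instance

-- ===== CLAIM (what is proved, stated in full; the proofs are below) =====
def Claim_equal_matches_part2 : Prop := ∀ (sue_props : List (String × Int)) (mfcsam : List (String × Int)), Dom_matches_part2 sue_props mfcsam → Spec_matches_part2 sue_props mfcsam (matches_part2 sue_props mfcsam)

-- ===== CLAIM (what is proved, stated in full; the proofs are below) =====
-- ===== LEMMAS AND PROOFS =====

-- the per-triple condition both programs decide
def p2Cond (t : String × Int × Int) : Prop :=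
  if p2IsGT t.1 then t.2.1 > t.2.2
  else if p2IsLT t.1 then t.2.1 < t.2.2
  else t.2.1 = t.2.2

theorem foldl_min_pos (xs : List Int) (x : Int) :
    0 < xs.foldl min x ↔ 0 < x ∧ ∀ y ∈ xs, 0 < y := by
  induction xs generalizing x with
  | nil => simp
  | cons y ys ih =>
    simp [List.foldl_cons, ih]
    tauto

theorem foldl_max_neg (xs : List Int) (x : Int) :
    xs.foldl max x < 0 ↔ x < 0 ∧ ∀ y ∈ xs, y < 0 := by
  induction xs generalizing x with
  | nil => simp
  | cons y ys ih =>
    simp [List.foldl_cons, ih]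
    tauto

theorem minD_pos (xs : List Int) : 0 < p2MinD xs 1 ↔ ∀ y ∈ xs, 0 < y := by
  cases xs with
  | nil => simp [p2MinD]
  | cons x rest => simp [p2MinD, foldl_min_pos]

theorem maxD_neg (xs : List Int) : p2MaxD xs (-1) < 0 ↔ ∀ y ∈ xs, y < 0 := by
  cases xs with
  | nil => simp [p2MaxD]
  | cons x rest => simp [p2MaxD, foldl_max_neg]

theorem alt_iff (sue_props mfcsam : List (String × Int)) :
    matches_part2_alt sue_props mfcsam = true ↔
      ∀ t ∈ p2Shared sue_props mfcsam, p2Cond t := by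
  simp only [matches_part2_alt, Bool.and_eq_true, decide_eq_true_eq, List.all_eq_true,
    List.mem_map, List.mem_filter, minD_pos, maxD_neg]
  constructor
  · rintro ⟨⟨hgt, hlt⟩, heq⟩ t ht
    unfold p2Cond
    split_ifs with h1 h2
    · have := hgt _ ⟨t, ⟨ht, h1⟩, rfl⟩; omega
    · have := hlt _ ⟨t, ⟨ht, h2⟩, rfl⟩; omega
    · have := heq t.2 ⟨t, ⟨ht, by simp [h1, h2]⟩, rfl⟩
      exact of_decide_eq_true (by simpa using this)
  · intro h
    refine ⟨⟨?_, ?_⟩, ?_⟩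
    · rintro y ⟨t, ⟨ht, hc⟩, rfl⟩
      have := h t ht; unfold p2Cond at this; rw [if_pos hc] at this; omega
    · rintro y ⟨t, ⟨ht, hc⟩, rfl⟩
      have := h t ht; unfold p2Cond at this
      have hg : p2IsGT t.1 = false := by
        cases hgt : p2IsGT t.1 with
        | false => rfl
        | true =>
          exfalso
          rcases Bool.or_eq_true_iff.mp hgt with h1 | h1 <;>
            rcases Bool.or_eq_true_iff.mp hc with h2 | h2 <;>
              simp [eq_of_beq h1] at h2
      rw [if_neg (by simp [hg]), if_pos hc] at this; omega
    · rintro vr ⟨t, ⟨ht, hc⟩, rfl⟩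
      have := h t ht; unfold p2Cond at this
      simp only [Bool.not_eq_true', Bool.or_eq_false_iff] at hc
      rw [if_neg (by simp [hc.1]), if_neg (by simp [hc.2])] at this
      simpa using this

theorem a_iff (mfcsam sue_props : List (String × Int)) :
    matchesP2Loop mfcsam sue_props = true ↔
      ∀ t ∈ p2Shared sue_props mfcsam, p2Cond t := by
  induction sue_props with
  | nil => simp [matchesP2Loop, p2Shared]
  | cons kv rest ih =>
    obtain ⟨k, v⟩ := kv
    simp only [matchesP2Loop, p2Shared, List.filterMap_cons]
    cases hf : mfcsam.find? (fun p => p.1 == k) with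
    | none => simpa [p2Shared] using ih
    | some p =>
      simp only [Option.map_some, List.mem_cons, forall_eq_or_imp]
      have hcond : p2Cond (k, v, p.2) ↔
          (if (k == "cats" || k == "trees") = true then v > p.2
           else if (k == "pomeranians" || k == "goldfish") = true then v < p.2
           else v = p.2) := by
        unfold p2Cond p2IsGT p2IsLT; rfl
      by_cases hg : (k == "cats" || k == "trees") = true
      · by_cases hv : v > p.2 <;>
          simp [hg, hv, hcond, ih, p2Shared]
      · by_cases hl : (k == "pomeranians" || k == "goldfish") = true
        · by_cases hv : v < p.2 <;>
            simp [hg, hl, hv, hcond, ih, p2Shared]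
        · rw [Bool.not_eq_true] at hg hl
          by_cases hv : v = p.2 <;>
            simp [hg, hl, hv, ih, p2Shared, p2Cond, p2IsGT, p2IsLT]

-- ===== VERDICT (by name: the statement is the Claim_ definition above) =====
theorem matches_part2_spec : Claim_equal_matches_part2 := by
  intro sue mf _
  unfold Spec_matches_part2 matches_part2
  rw [Bool.eq_iff_iff, a_iff, alt_iff]
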